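-- pv_equiv track=rewrite | github.com/daniel-reich/ubiquitous-fiesta | 6o5wkfmSaFXCJYqDx_16.py | abcmath
-- ===== SOURCE A (Python) =====
-- def abcmath(a, b, c):
--   x = 0
--   s = a
--   while x < b:
--     s = s + s
--     x = x + 1
--   dm = divmod(s, c)
--   if dm[1] == 0:
--     return True
--   else:
--     return False
-- ===== SOURCE B (Python) =====
-- def abcmath(a, b, c):
--     e = b if b > 0 else 0
--     return a * 2 ** e % c == 0
-- ===== Notes on version B (the rewrite author's own statement) =====
-- stated objective: faster
-- what changed: Replaces the O(b)-iteration doubling loop with a single closed-form big-integer expression a * 2**max(b,0) % c.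
import Mathlib
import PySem

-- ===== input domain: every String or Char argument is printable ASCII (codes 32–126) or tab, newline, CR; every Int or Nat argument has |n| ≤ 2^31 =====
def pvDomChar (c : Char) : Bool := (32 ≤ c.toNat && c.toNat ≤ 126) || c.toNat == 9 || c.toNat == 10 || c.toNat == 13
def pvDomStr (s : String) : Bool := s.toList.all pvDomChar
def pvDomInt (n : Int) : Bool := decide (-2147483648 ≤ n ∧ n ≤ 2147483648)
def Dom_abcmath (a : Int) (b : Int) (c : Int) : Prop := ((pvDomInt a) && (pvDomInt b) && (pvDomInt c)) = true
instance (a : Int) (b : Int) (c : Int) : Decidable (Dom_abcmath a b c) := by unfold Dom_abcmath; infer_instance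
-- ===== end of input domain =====

-- B replaces A's O(b) doubling loop by the closed form a * 2**max(b,0) % c == 0 (asymptotically faster).

-- ===== PORT A =====
-- the while loop: while x < b: s = s + s; x = x + 1
def abcmathLoop (b : Int) (x : Int) (s : Int) : Int :=
  if x < b then abcmathLoop b (x + 1) (s + s) else s
termination_by (b - x).toNat
decreasing_by omega

def abcmath (a : Int) (b : Int) (c : Int) : Bool :=
  let s := abcmathLoop b 0 a
  -- dm = divmod(s, c); dm[1] == 0 — with c ≠ 0 (Pre_), dm[1] is PySem.Int.mod s c
  if PySem.Int.mod s c == 0 then true else false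

-- ===== PORT B =====
def abcmath_alt (a : Int) (b : Int) (c : Int) : Bool :=
  let e : Nat := if 0 < b then b.toNat else 0
  PySem.Int.mod (a * 2 ^ e) c == 0

-- ===== PRECONDITION & SPEC =====
-- Pre_ excludes only c = 0, where Python's divmod raises ZeroDivisionError (B raises too).
def Pre_abcmath (a : Int) (b : Int) (c : Int) : Prop := c ≠ 0
instance (a : Int) (b : Int) (c : Int) : Decidable (Pre_abcmath a b c) := by unfold Pre_abcmath; infer_instance
def pvWitness_abcmath : Int × Int × Int := (3, 4, 6)

def Spec_abcmath (a : Int) (b : Int) (c : Int) (out : Bool) : Prop := out = abcmath_alt a b c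
instance (a : Int) (b : Int) (c : Int) (out : Bool) : Decidable (Spec_abcmath a b c out) := by unfold Spec_abcmath; infer_instance

-- ===== CLAIM (what is proved, stated in full; the proofs are below) =====
def Claim_equal_abcmath : Prop := ∀ (a : Int) (b : Int) (c : Int), Dom_abcmath a b c → Pre_abcmath a b c → Spec_abcmath a b c (abcmath a b c)

-- ===== LEMMAS AND PROOFS =====

theorem abcmathLoop_eq (b x s : Int) : abcmathLoop b x s = s * 2 ^ (b - x).toNat := by
  generalize h : (b - x).toNat = n
  induction n generalizing x s with
  | zero => rw [abcmathLoop]; rw [if_neg (by omega)]; simp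
  | succ k ih =>
      rw [abcmathLoop]; rw [if_pos (by omega)]
      rw [ih (x + 1) (s + s) (by omega)]
      ring

-- ===== VERDICT (by name: the statement is the Claim_ definition above) =====
theorem abcmath_spec : Claim_equal_abcmath := by
  intro a b c _ _
  unfold Spec_abcmath abcmath abcmath_alt
  rw [abcmathLoop_eq]
  by_cases hb : 0 < b
  · simp only [if_pos hb]
    have : (b - 0).toNat = b.toNat := by omega
    rw [this]
    split <;> simp_all
  · simp only [if_neg hb]
    have : (b - 0).toNat = 0 := by omega
    rw [this]
    split <;> simp_all
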